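-- pv_equiv track=rewrite | github.com/chanakyagt/AI_Newsletter | run_pipeline.py | _find_div_block
-- ===== SOURCE A (Python) =====
-- def _find_div_block(html_str: str, open_tag: str) -> tuple[int, int]:
--     """
--     Finds (start, end) of a div block that begins with open_tag.
--     Uses a depth counter so nested <div> tags never confuse the search.
--     Returns (-1, -1) if not found or if the block is unclosed.
--     """
--     start = html_str.find(open_tag)
--     if start == -1:
--         return -1, -1
--     depth, i = 0, start
--     while i < len(html_str):
--         if html_str[i:i+4] == '<div':
--             depth += 1; i += 4
--         elif html_str[i:i+6] == '</div>':
--             depth -= 1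
--             if depth == 0:
--                 return start, i + 6
--             i += 6
--         else:
--             i += 1
--     return -1, -1
-- ===== SOURCE B (Python) =====
-- import re
--
-- _DIV_EVENT = re.compile(r'<div|</div>')
--
-- def _find_div_block(html_str: str, open_tag: str) -> tuple[int, int]:
--     """Event-driven rewrite: index all div-tag events with one regex scan,
--     then walk the events at or after the open_tag position with a depth counter."""
--     start = html_str.find(open_tag)
--     if start == -1:
--         return -1, -1
--     depth = 0
--     for m in _DIV_EVENT.finditer(html_str):
--         if m.start() < start:
--             continue
--         if m.group() == '<div':
--             depth += 1
--         else:
--             depth -= 1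
--             if depth == 0:
--                 return start, m.end()
--     return -1, -1
-- ===== Notes on version B (the rewrite author's own statement) =====
-- stated objective: faster
-- what changed: Replaces A's character-by-character while-loop with jump arithmetic by a single compiled-regex scan that indexes all '<div'/'</div>' tag events, then a depth-counting walk over that event list starting at the open_tag position.
import Mathlib
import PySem

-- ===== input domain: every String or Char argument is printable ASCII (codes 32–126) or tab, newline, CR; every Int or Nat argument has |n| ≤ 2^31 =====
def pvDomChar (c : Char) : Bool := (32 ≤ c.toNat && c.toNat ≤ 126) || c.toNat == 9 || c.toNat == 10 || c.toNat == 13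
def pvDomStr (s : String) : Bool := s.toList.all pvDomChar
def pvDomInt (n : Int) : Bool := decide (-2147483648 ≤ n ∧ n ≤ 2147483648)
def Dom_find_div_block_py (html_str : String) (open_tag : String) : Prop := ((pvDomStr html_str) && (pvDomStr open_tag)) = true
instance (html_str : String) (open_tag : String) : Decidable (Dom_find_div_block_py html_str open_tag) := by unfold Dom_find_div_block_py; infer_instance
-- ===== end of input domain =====

-- B replaces A's character-stepping while-loop by a one-pass tag-event index (regex scan)
-- walked with a depth counter; objective: faster (same asymptotics, measured constant-factor win).

-- ===== PORT A =====
-- A's while-loop: depth counter, i jumps by 4 / 6 / 1.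
def pyAFindLoop (cs : List Char) (start : Int) (depth : Int) (i : Nat) : Int × Int :=
  if _h : i < cs.length then
    if PySem.List.slice cs (some (i : Int)) (some ((i : Int) + (4 : Nat))) = ['<','d','i','v'] then
      pyAFindLoop cs start (depth + 1) (i + 4)
    else if PySem.List.slice cs (some (i : Int)) (some ((i : Int) + (6 : Nat))) = ['<','/','d','i','v','>'] then
      if depth - 1 = 0 then (start, (i : Int) + 6)
      else pyAFindLoop cs start (depth - 1) (i + 6)
    else
      pyAFindLoop cs start depth (i + 1)
  else (-1, -1)
termination_by cs.length - i

def find_div_block_py (html_str : String) (open_tag : String) : Int × Int :=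
  let start := PySem.Str.find html_str open_tag
  if start = -1 then (-1, -1)
  else pyAFindLoop html_str.toList start 0 start.toNat

-- ===== PORT B =====
-- regex alternation '<div|</div>' at one position: '<div' tried first; none if neither matches.
def divMatchAt (cs : List Char) (i : Nat) : Option Bool :=
  if PySem.List.slice cs (some (i : Int)) (some ((i : Int) + (4 : Nat))) = ['<','d','i','v'] then some true
  else if PySem.List.slice cs (some (i : Int)) (some ((i : Int) + (6 : Nat))) = ['<','/','d','i','v','>'] then some false
  else none

-- re.finditer(r'<div|</div>', ·): leftmost, non-overlapping matches as (start, isOpen, end).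
def divEvents (cs : List Char) (i : Nat) : List (Nat × Bool × Nat) :=
  if _h : i < cs.length then
    match divMatchAt cs i with
    | some true  => (i, true, i + 4) :: divEvents cs (i + 4)
    | some false => (i, false, i + 6) :: divEvents cs (i + 6)
    | none       => divEvents cs (i + 1)
  else []
termination_by cs.length - i

-- B's for-loop over the match objects.
def runDivEvents (start : Int) (depth : Int) : List (Nat × Bool × Nat) → Int × Int
  | [] => (-1, -1)
  | (p, b, e) :: rest =>
    if (p : Int) < start then runDivEvents start depth rest
    else if b then runDivEvents start (depth + 1) rest
    else if depth - 1 = 0 then (start, (e : Int))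
    else runDivEvents start (depth - 1) rest

def find_div_block_py_alt (html_str : String) (open_tag : String) : Int × Int :=
  let start := PySem.Str.find html_str open_tag
  if start = -1 then (-1, -1)
  else runDivEvents start 0 (divEvents html_str.toList 0)

-- ===== PRECONDITION & SPEC =====
def Spec_find_div_block_py (html_str : String) (open_tag : String) (out : Int × Int) : Prop := out = find_div_block_py_alt html_str open_tag
instance (html_str : String) (open_tag : String) (out : Int × Int) : Decidable (Spec_find_div_block_py html_str open_tag out) := by unfold Spec_find_div_block_py; infer_instance

-- ===== CLAIM (what is proved, stated in full; the proofs are below) =====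
def Claim_equal_find_div_block_py : Prop := ∀ (html_str : String) (open_tag : String), Dom_find_div_block_py html_str open_tag → Spec_find_div_block_py html_str open_tag (find_div_block_py html_str open_tag)

-- ===== LEMMAS AND PROOFS =====

theorem divEvents_nil {cs : List Char} {i : Nat} (h : ¬ i < cs.length) : divEvents cs i = [] := by
  rw [divEvents]; simp [h]

-- elements of a slice-equality pattern, read off at absolute positions
theorem slice_eq_getElem? {cs l : List Char} {q n : Nat}
    (h : PySem.List.slice cs (some (q : Int)) (some ((q : Int) + (n : Nat))) = l)
    (k : Nat) (hk : k < l.length) : cs[q + k]? = some l[k] := by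
  rw [PySem.List.slice_natCast_add] at h
  have hlen : l.length ≤ n := by
    rw [← h]; exact le_trans (List.length_take_le _ _) (le_refl _)
  have := congrArg (fun t => t[k]?) h
  simpa [List.getElem?_take, List.getElem?_drop, Nat.lt_of_lt_of_le hk hlen,
    List.getElem?_eq_getElem hk] using this

theorem divMatchAt_none {cs : List Char} {q : Nat} (h : cs[q]? ≠ some '<') :
    divMatchAt cs q = none := by
  unfold divMatchAt
  split_ifs with h1 h2
  · exact absurd (by simpa using slice_eq_getElem? h1 0 (by simp)) h
  · exact absurd (by simpa using slice_eq_getElem? h2 0 (by simp)) h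
  · rfl

-- interiors of a matched tag contain no '<', hence no further match starts there
theorem divMatchAt_interior {cs : List Char} {i q : Nat} {b : Bool}
    (h : divMatchAt cs i = some b) (h1 : i < q) (h2 : q < i + (if b then 4 else 6)) :
    divMatchAt cs q = none := by
  unfold divMatchAt at h
  obtain ⟨k, rfl⟩ : ∃ k, q = i + k := ⟨q - i, by omega⟩
  split_ifs at h with ho hc
  · injection h with hb; subst hb
    norm_num at h2
    apply divMatchAt_none
    have hk : k = 1 ∨ k = 2 ∨ k = 3 := by omega
    rcases hk with rfl | rfl | rfl
    · have hv := slice_eq_getElem? ho 1 (by norm_num); simp at hv; simp [hv]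
    · have hv := slice_eq_getElem? ho 2 (by norm_num); simp at hv; simp [hv]
    · have hv := slice_eq_getElem? ho 3 (by norm_num); simp at hv; simp [hv]
  · injection h with hb; subst hb
    norm_num at h2
    apply divMatchAt_none
    have hk : k = 1 ∨ k = 2 ∨ k = 3 ∨ k = 4 ∨ k = 5 := by omega
    rcases hk with rfl | rfl | rfl | rfl | rfl
    · have hv := slice_eq_getElem? hc 1 (by norm_num); simp at hv; simp [hv]
    · have hv := slice_eq_getElem? hc 2 (by norm_num); simp at hv; simp [hv]
    · have hv := slice_eq_getElem? hc 3 (by norm_num); simp at hv; simp [hv]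
    · have hv := slice_eq_getElem? hc 4 (by norm_num); simp at hv; simp [hv]
    · have hv := slice_eq_getElem? hc 5 (by norm_num); simp at hv; simp [hv]

-- positions carrying no match can be skipped by the event scan
theorem divEvents_ext {cs : List Char} : ∀ (n a b : Nat), b - a ≤ n → a ≤ b →
    (∀ q, a ≤ q → q < b → divMatchAt cs q = none) → divEvents cs a = divEvents cs b := by
  intro n
  induction n with
  | zero =>
    intro a b h1 h2 _
    have hab : a = b := by omega
    rw [hab]
  | succ n IH =>
    intro a b h1 h2 hnone
    rcases Nat.eq_or_lt_of_le h2 with rfl | hab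
    · rfl
    · by_cases hlen : a < cs.length
      · rw [divEvents]
        simp only [hlen, dif_pos, hnone a (le_refl _) hab]
        exact IH (a + 1) b (by omega) (by omega) (fun q hq hq' => hnone q (by omega) hq')
      · rw [divEvents_nil hlen, divEvents_nil (by omega)]

-- A's loop equals B's event walk when scanning starts at the same position
theorem loop_eq_run {cs : List Char} {start : Int} (h0 : 0 ≤ start) :
    ∀ (n i : Nat) (depth : Int), cs.length - i ≤ n → start.toNat ≤ i →
      pyAFindLoop cs start depth i = runDivEvents start depth (divEvents cs i) := by
  have hcast : ∀ i : Nat, start.toNat ≤ i → ¬ ((i : Int) < start) := by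
    intro i hi
    have := Int.toNat_of_nonneg h0
    omega
  intro n
  induction n with
  | zero =>
    intro i depth hle hi
    rw [pyAFindLoop, divEvents_nil (by omega)]
    simp [show ¬ i < cs.length by omega, runDivEvents]
  | succ n IH =>
    intro i depth hle hi
    by_cases hlen : i < cs.length
    · rw [pyAFindLoop, divEvents]
      simp only [hlen, dif_pos]
      by_cases h1 : PySem.List.slice cs (some (i : Int)) (some ((i : Int) + (4 : Nat))) = ['<','d','i','v']
      · have hm : divMatchAt cs i = some true := by unfold divMatchAt; rw [if_pos h1]
        simp only [h1, if_pos, hm]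
        rw [runDivEvents]
        simp only [hcast i hi, if_pos, reduceIte]
        exact IH (i + 4) (depth + 1) (by omega) (by omega)
      · by_cases h2 : PySem.List.slice cs (some (i : Int)) (some ((i : Int) + (6 : Nat))) = ['<','/','d','i','v','>']
        · have hm : divMatchAt cs i = some false := by unfold divMatchAt; rw [if_neg h1, if_pos h2]
          simp only [h1, h2, if_pos, hm, reduceIte]
          rw [runDivEvents]
          simp only [hcast i hi, reduceIte, Bool.false_eq_true]
          by_cases hd : depth - 1 = 0
          · simp only [hd, if_pos]; norm_num
          · simp only [hd, reduceIte]
            exact IH (i + 6) (depth - 1) (by omega) (by omega)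
        · have hm : divMatchAt cs i = none := by unfold divMatchAt; rw [if_neg h1, if_neg h2]
          simp only [h1, h2, hm, reduceIte]
          exact IH (i + 1) depth (by omega) (by omega)
    · rw [pyAFindLoop, divEvents_nil hlen]
      simp [hlen, runDivEvents]

-- skipping the events strictly before the open_tag position does not change the walk
theorem run_shift {cs : List Char} {start : Int} (h0 : 0 ≤ start) :
    ∀ (n i : Nat) (depth : Int), start.toNat - i ≤ n → i ≤ start.toNat →
      runDivEvents start depth (divEvents cs i) = runDivEvents start depth (divEvents cs start.toNat) := by
  intro n
  induction n with
  | zero =>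
    intro i depth hle hi
    have : i = start.toNat := by omega
    rw [this]
  | succ n IH =>
    intro i depth hle hi
    rcases Nat.eq_or_lt_of_le hi with heq | hlt
    · rw [heq]
    · have hcast : (i : Int) < start := by
        have := Int.toNat_of_nonneg h0
        omega
      by_cases hlen : i < cs.length
      · rw [divEvents]
        simp only [hlen, dif_pos]
        cases hm : divMatchAt cs i with
        | none => exact IH (i + 1) depth (by omega) (by omega)
        | some b =>
          have hskip : ∀ j, runDivEvents start depth ((i, b, j) :: divEvents cs j)
              = runDivEvents start depth (divEvents cs j) := by
            intro j; rw [runDivEvents]; simp [hcast]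
          have hmain : ∀ j, j = i + (if b then 4 else 6) →
              runDivEvents start depth (divEvents cs j) = runDivEvents start depth (divEvents cs start.toNat) := by
            intro j hj
            have hij : i < j := by rw [hj]; cases b <;> simp
            by_cases hjs : j ≤ start.toNat
            · exact IH j depth (by omega) hjs
            · have hsame : divEvents cs start.toNat = divEvents cs j := by
                refine divEvents_ext (j - start.toNat) start.toNat j (by omega) (by omega) ?_
                intro q hq hq'
                exact divMatchAt_interior hm (by omega) (by rw [← hj]; omega)
              rw [hsame]
          cases b
          · rw [hskip]; exact hmain (i + 6) (by simp)
          · rw [hskip]; exact hmain (i + 4) (by simp)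
      · rw [divEvents_nil hlen, divEvents_nil (by omega)]

-- ===== VERDICT (by name: the statement is the Claim_ definition above) =====
theorem find_div_block_py_spec : Claim_equal_find_div_block_py := by
  intro html_str open_tag _
  unfold Spec_find_div_block_py find_div_block_py find_div_block_py_alt
  set start := PySem.Str.find html_str open_tag with hs
  by_cases h : start = -1
  · simp [h]
  · have h0 : 0 ≤ start := by
      have h1 : -1 ≤ start := by rw [hs]; simp; exact PySem.Chars.neg_one_le_find _ _
      omega
    simp only [h, reduceIte]
    rw [loop_eq_run h0 (html_str.toList.length - start.toNat) start.toNat 0 (le_refl _) (le_refl _),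
      run_shift h0 start.toNat 0 0 (le_refl _) (Nat.zero_le _)]
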